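-- pv_equiv track=rewrite | github.com/MartianDreamer/Algorithm-practice | strongly-connected-components.py | second_dfs
-- ===== SOURCE A (Python) =====
-- from typing import Dict, List
--
-- def second_dfs(graph: List):
--     count_element = len(graph)
--     is_visited = []
--     leaders = []
--     counts = []
--     for i in range(0, count_element):
--         is_visited.append(False)
--         leaders.append(i)
--     for vertex in range(len(graph)-1, -1, -1):
--         if not is_visited[vertex]:
--             count = second_dfs_visit(
--                 graph, vertex, is_visited, leaders, vertex, 0)
--             counts.append(count)
--     return counts
--
-- def second_dfs_visit(graph: List, vertex: int, is_visited: List, leaders: List, leader: int, count: int):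
--     leaders[vertex] = leader
--     count += 1
--     is_visited[vertex] = True
--     for node in graph[vertex]:
--         if not is_visited[node]:
--             count = second_dfs_visit(
--                 graph, node, is_visited, leaders, leader, count)
--     return count
-- ===== SOURCE B (Python) =====
-- def second_dfs(graph):
--     n = len(graph)
--     is_visited = [False] * n
--     counts = []
--     for vertex in range(n - 1, -1, -1):
--         if not is_visited[vertex]:
--             is_visited[vertex] = True
--             count = 1
--             stack = [graph[vertex]]
--             while stack:
--                 ns = stack[-1]
--                 if ns:
--                     node = ns[0]
--                     stack[-1] = ns[1:]
--                     if not is_visited[node]: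
--                         is_visited[node] = True
--                         count += 1
--                         stack.append(graph[node])
--                 else:
--                     stack.pop()
--             counts.append(count)
--     return counts
-- ===== Notes on version B (the rewrite author's own statement) =====
-- stated objective: alternative
-- what changed: Replaces A's recursive DFS helper (with its leaders bookkeeping) by an iterative DFS using an explicit stack of remaining-neighbour frames, keeping only is_visited and the per-component count.
import Mathlib
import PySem

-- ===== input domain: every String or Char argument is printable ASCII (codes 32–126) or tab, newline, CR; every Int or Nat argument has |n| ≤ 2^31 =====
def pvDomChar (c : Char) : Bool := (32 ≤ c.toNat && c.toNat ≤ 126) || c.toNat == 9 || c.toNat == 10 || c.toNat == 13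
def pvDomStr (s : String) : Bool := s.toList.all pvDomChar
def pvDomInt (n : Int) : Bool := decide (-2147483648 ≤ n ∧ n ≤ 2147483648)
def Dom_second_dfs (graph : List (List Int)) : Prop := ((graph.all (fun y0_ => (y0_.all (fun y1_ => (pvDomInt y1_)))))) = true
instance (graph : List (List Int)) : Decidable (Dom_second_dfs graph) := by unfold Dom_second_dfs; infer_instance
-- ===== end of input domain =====

-- B replaces A's recursive DFS by an iterative DFS over an explicit stack of remaining-neighbour
-- frames (and drops the never-returned `leaders` bookkeeping); equal return value on Pre_.

-- ===== PORT A =====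
-- init loop: 'for i in range(0, count_element): is_visited.append(False); leaders.append(i)'
def pvInitA (n : Nat) : List Bool × List Int :=
  (PySem.List.pyRange 0 (n : Int) 1).foldl (fun p i => (p.1 ++ [false], p.2 ++ [i])) ([], [])

-- second_dfs_visit, transliterated; the Nat argument is a fuel guard only (Python recursion has
-- none); the top-level call passes graph.length, which the proof shows is always sufficient.
mutual
def pvVisitA (g : List (List Int)) : Nat → Int → List Bool → List Int → Int → Int →
    List Bool × List Int × Int
  | 0, _, vis, ld, _, cnt => (vis, ld, cnt)
  | fuel + 1, vertex, vis, ld, leader, cnt =>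
      let ld1 := PySem.List.pySetD ld vertex leader          -- leaders[vertex] = leader
      let cnt1 := cnt + 1                                    -- count += 1
      let vis1 := PySem.List.pySetD vis vertex true          -- is_visited[vertex] = True
      pvGoA g fuel (PySem.List.pyGetD g vertex []) vis1 ld1 leader cnt1
termination_by fuel _ _ _ _ _ => (fuel, 0)

-- 'for node in graph[vertex]: if not is_visited[node]: count = second_dfs_visit(...)'
def pvGoA (g : List (List Int)) : Nat → List Int → List Bool → List Int → Int → Int →
    List Bool × List Int × Int
  | _, [], vis, ld, _, cnt => (vis, ld, cnt)
  | fuel, node :: rest, vis, ld, leader, cnt =>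
      if PySem.List.pyGetD vis node true then
        pvGoA g fuel rest vis ld leader cnt
      else
        let r := pvVisitA g fuel node vis ld leader cnt
        pvGoA g fuel rest r.1 r.2.1 leader r.2.2
termination_by fuel ns _ _ _ _ => (fuel, ns.length + 1)
end


def pvStepA (graph : List (List Int)) (st : List Bool × List Int × List Int) (vertex : Int) :
    List Bool × List Int × List Int :=
  if PySem.List.pyGetD st.1 vertex true then st
  else
    let r := pvVisitA graph graph.length vertex st.1 st.2.1 vertex 0
    (r.1, r.2.1, st.2.2 ++ [r.2.2])

def second_dfs (graph : List (List Int)) : List Int :=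
  ((PySem.List.pyRange ((graph.length : Int) - 1) (-1) (-1)).foldl (pvStepA graph)
    ((pvInitA graph.length).1, (pvInitA graph.length).2, [])).2.2

-- ===== PORT B =====
-- helper lemmas used by pvStackB's termination argument (marking an unvisited vertex shrinks
-- the number of unvisited entries)
theorem pvIdx_get_set {a : Type} (xs : List a) (i : Int) (v x : a)
    (h : PySem.List.pyGet? xs i = some x) :
    ∃ k : Nat, xs[k]? = some x ∧ PySem.List.pySetD xs i v = xs.set k v := by
  unfold PySem.List.pyGet? at h
  unfold PySem.List.pySetD PySem.List.pySet?
  cases hk : PySem.List.pyIdx? xs.length i with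
  | none => rw [hk] at h; simp at h
  | some k => rw [hk] at h; exact ⟨k, by simpa using h, by simp⟩

theorem pvCount_set_lt : ∀ (l : List Bool) (k : Nat), l[k]? = some false →
    (l.set k true).count false < l.count false := by
  intro l
  induction l with
  | nil => intro k h; simp at h
  | cons a t ih =>
    intro k h
    cases k with
    | zero =>
      simp only [List.getElem?_cons_zero, Option.some.injEq] at h
      subst h; simp
    | succ k =>
      simp only [List.getElem?_cons_succ] at h
      have := ih k h
      simp only [List.set_cons_succ, List.count_cons]
      omega

theorem pvGetD_false (vis : List Bool) (i : Int)
    (h : PySem.List.pyGetD vis i true = false) :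
    PySem.List.pyGet? vis i = some false := by
  unfold PySem.List.pyGetD at h
  cases hg : PySem.List.pyGet? vis i with
  | none => rw [hg] at h; simp at h
  | some b => rw [hg] at h; simp at h; simp [h]

theorem pvMark_lt (vis : List Bool) (i : Int)
    (h : PySem.List.pyGetD vis i true = false) :
    (PySem.List.pySetD vis i true).count false < vis.count false := by
  obtain ⟨k, hk, hset⟩ := pvIdx_get_set vis i true false (pvGetD_false vis i h)
  rw [hset]; exact pvCount_set_lt vis k hk

-- the while loop over the explicit stack of remaining-neighbour frames
def pvStackB (g : List (List Int)) : List (List Int) → List Bool → Int → List Bool × Int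
  | [], vis, cnt => (vis, cnt)
  | [] :: rest, vis, cnt => pvStackB g rest vis cnt
  | (node :: ns) :: rest, vis, cnt =>
      if h : PySem.List.pyGetD vis node true then
        pvStackB g (ns :: rest) vis cnt
      else
        pvStackB g (PySem.List.pyGetD g node [] :: ns :: rest)
          (PySem.List.pySetD vis node true) (cnt + 1)
termination_by stack vis _ => (vis.count false, (stack.map (fun f => f.length + 1)).sum)
decreasing_by
  · apply Prod.Lex.right; simp
  · apply Prod.Lex.right; simp
  · apply Prod.Lex.left; exact pvMark_lt vis node (by simpa using h)

def pvStepB (graph : List (List Int)) (st : List Bool × List Int) (vertex : Int) :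
    List Bool × List Int :=
  if PySem.List.pyGetD st.1 vertex true then st
  else
    let vis1 := PySem.List.pySetD st.1 vertex true
    let r := pvStackB graph [PySem.List.pyGetD graph vertex []] vis1 1
    (r.1, st.2 ++ [r.2])

def second_dfs_alt (graph : List (List Int)) : List Int :=
  ((PySem.List.pyRange ((graph.length : Int) - 1) (-1) (-1)).foldl (pvStepB graph)
    (List.replicate graph.length false, [])).2

-- ===== PRECONDITION & SPEC =====
-- Pre_ excludes exactly the graphs with a neighbour index outside [-len(graph), len(graph)):
-- every vertex is eventually visited and its whole adjacency list indexed, so Python A raises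
-- IndexError there (a negative index in range wraps around, Python-style, and is admitted).
def Pre_second_dfs (graph : List (List Int)) : Prop :=
  ∀ ns ∈ graph, ∀ node ∈ ns, -(graph.length : Int) ≤ node ∧ node < graph.length
instance (graph : List (List Int)) : Decidable (Pre_second_dfs graph) := by
  unfold Pre_second_dfs; infer_instance
def pvWitness_second_dfs : List (List Int) := [[1], [0], [-1]]

def Spec_second_dfs (graph : List (List Int)) (out : List Int) : Prop := out = second_dfs_alt graph
instance (graph : List (List Int)) (out : List Int) : Decidable (Spec_second_dfs graph out) := by
  unfold Spec_second_dfs; infer_instance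

-- ===== CLAIM (what is proved, stated in full; the proofs are below) =====
def Claim_equal_second_dfs : Prop := ∀ (graph : List (List Int)), Dom_second_dfs graph →
  Pre_second_dfs graph → Spec_second_dfs graph (second_dfs graph)

-- ===== LEMMAS AND PROOFS =====

theorem pvCount_set_le : ∀ (l : List Bool) (k : Nat),
    (l.set k true).count false ≤ l.count false := by
  intro l
  induction l with
  | nil => intro k; simp
  | cons a t ih =>
    intro k
    cases k with
    | zero => cases a <;> simp
    | succ k => simp only [List.set_cons_succ, List.count_cons]; have := ih k; omega

theorem pvMark_le (vis : List Bool) (i : Int) :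
    (PySem.List.pySetD vis i true).count false ≤ vis.count false := by
  unfold PySem.List.pySetD PySem.List.pySet?
  cases hk : PySem.List.pyIdx? vis.length i with
  | none => simp
  | some k => simpa using pvCount_set_le vis k

theorem pvGoA_mu (g : List (List Int)) :
    ∀ (fuel : Nat) (ns : List Int) (vis : List Bool) (ld : List Int) (leader cnt : Int),
      (pvGoA g fuel ns vis ld leader cnt).1.count false ≤ vis.count false := by
  intro fuel
  induction fuel with
  | zero =>
    intro ns
    induction ns with
    | nil => intro vis ld leader cnt; simp [pvGoA]
    | cons node rest ih =>
      intro vis ld leader cnt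
      simp only [pvGoA]
      split
      · exact ih vis ld leader cnt
      · simpa [pvVisitA] using ih vis ld leader (cnt)
  | succ f ihf =>
    intro ns
    induction ns with
    | nil => intro vis ld leader cnt; simp [pvGoA]
    | cons node rest ih =>
      intro vis ld leader cnt
      simp only [pvGoA]
      split
      · exact ih vis ld leader cnt
      · calc (pvGoA g (f+1) rest (pvVisitA g (f+1) node vis ld leader cnt).1
                (pvVisitA g (f+1) node vis ld leader cnt).2.1 leader
                (pvVisitA g (f+1) node vis ld leader cnt).2.2).1.count false
            ≤ (pvVisitA g (f+1) node vis ld leader cnt).1.count false := ih _ _ _ _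
          _ ≤ vis.count false := by
              simp only [pvVisitA]
              exact le_trans (ihf _ _ _ _ _) (pvMark_le vis node)

theorem pvLen_stackB (g : List (List Int)) :
    ∀ (stack : List (List Int)) (vis : List Bool) (cnt : Int),
      (pvStackB g stack vis cnt).1.length = vis.length := by
  intro stack vis cnt
  induction stack, vis, cnt using pvStackB.induct g with
  | case1 vis cnt => simp [pvStackB]
  | case2 rest vis cnt ih => simpa [pvStackB] using ih
  | case3 node ns rest vis cnt h ih => simpa [pvStackB, h] using ih
  | case4 node ns rest vis cnt h ih =>
    rw [pvStackB]
    simp only [h]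
    simpa [PySem.List.length_pySetD] using ih

theorem pvSim (g : List (List Int)) :
    ∀ (fuel : Nat) (ns : List Int) (vis : List Bool) (ld : List Int) (leader cnt : Int)
      (stack : List (List Int)), vis.count false ≤ fuel →
      pvStackB g stack (pvGoA g fuel ns vis ld leader cnt).1 (pvGoA g fuel ns vis ld leader cnt).2.2
        = pvStackB g (ns :: stack) vis cnt := by
  intro fuel
  induction fuel with
  | zero =>
    intro ns
    induction ns with
    | nil => intro vis ld leader cnt stack hmu; simp [pvGoA, pvStackB]
    | cons node rest ih =>
      intro vis ld leader cnt stack hmu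
      simp only [pvGoA]
      rw [pvStackB]
      split
      · exact ih vis ld leader cnt stack hmu
      · -- impossible: an unvisited entry exists, so vis.count false ≥ 1 > 0 = fuel
        rename_i h
        have hg := pvGetD_false vis node (by simpa using h)
        have hmem : false ∈ vis := PySem.List.mem_of_pyGet?_eq_some vis hg
        have : 0 < vis.count false := List.count_pos_iff.mpr hmem
        omega
  | succ f ihf =>
    intro ns
    induction ns with
    | nil => intro vis ld leader cnt stack hmu; simp [pvGoA, pvStackB]
    | cons node rest ih =>
      intro vis ld leader cnt stack hmu
      simp only [pvGoA]
      rw [pvStackB]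
      split
      · exact ih vis ld leader cnt stack hmu
      · rename_i h
        have hg := pvGetD_false vis node (by simpa using h)
        have hlt : (PySem.List.pySetD vis node true).count false < vis.count false :=
          pvMark_lt vis node (by simpa using h)
        have hvisit : pvVisitA g (f+1) node vis ld leader cnt
            = pvGoA g f (PySem.List.pyGetD g node []) (PySem.List.pySetD vis node true)
                (PySem.List.pySetD ld node leader) leader (cnt + 1) := by
          simp [pvVisitA]
        have hmu1 : ((pvVisitA g (f+1) node vis ld leader cnt).1).count false
            ≤ f + 1 := by
          rw [hvisit]
          exact le_trans (pvGoA_mu g f _ _ _ leader (cnt+1)) (by omega)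
        rw [ih _ _ leader _ stack hmu1]
        rw [hvisit]
        exact ihf _ _ _ leader (cnt+1) (rest :: stack) (by omega)

theorem pvOuter (g : List (List Int)) :
    ∀ (vs : List Int) (vis : List Bool) (ld counts : List Int), vis.length = g.length →
      (vs.foldl (pvStepA g) (vis, ld, counts)).1 = (vs.foldl (pvStepB g) (vis, counts)).1 ∧
      (vs.foldl (pvStepA g) (vis, ld, counts)).2.2 = (vs.foldl (pvStepB g) (vis, counts)).2 := by
  intro vs
  induction vs with
  | nil => intro vis ld counts hlen; simp
  | cons v rest ih =>
    intro vis ld counts hlen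
    simp only [List.foldl_cons]
    unfold pvStepA pvStepB
    simp only
    split
    · exact ih vis ld counts hlen
    · rename_i h
      have hg := pvGetD_false vis v (by simpa using h)
      -- graph is nonempty here, so graph.length = m + 1
      have hpos : 0 < vis.length := by
        cases vis with
        | nil => simp [PySem.List.pyGet?, PySem.List.pyIdx?] at hg
        | cons b t => simp
      obtain ⟨m, hm⟩ : ∃ m, g.length = m + 1 := ⟨g.length - 1, by omega⟩
      have hvisit : pvVisitA g g.length v vis ld v 0
          = pvGoA g m (PySem.List.pyGetD g v []) (PySem.List.pySetD vis v true)
              (PySem.List.pySetD ld v v) v 1 := by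
        rw [hm]; simp [pvVisitA]
      have hmu : ((PySem.List.pySetD vis v true).count false) ≤ m := by
        have h1 := pvMark_lt vis v (by simpa using h)
        have h2 : vis.count false ≤ vis.length := List.count_le_length
        omega
      have hsim := pvSim g m (PySem.List.pyGetD g v []) (PySem.List.pySetD vis v true)
        (PySem.List.pySetD ld v v) v 1 [] hmu
      rw [pvStackB] at hsim
      -- hsim : (goA result vis, goA result cnt) = pvStackB g [adj] vis1 1
      have hfst : (pvVisitA g g.length v vis ld v 0).1
          = (pvStackB g [PySem.List.pyGetD g v []] (PySem.List.pySetD vis v true) 1).1 := by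
        rw [hvisit, ← hsim]
      have hsnd : (pvVisitA g g.length v vis ld v 0).2.2
          = (pvStackB g [PySem.List.pyGetD g v []] (PySem.List.pySetD vis v true) 1).2 := by
        rw [hvisit, ← hsim]
      rw [hfst, hsnd]
      apply ih
      rw [pvLen_stackB, PySem.List.length_pySetD]
      exact hlen

theorem pvInit_aux : ∀ (l : List Int) (p : List Bool × List Int),
    ((l.foldl (fun p i => (p.1 ++ [false], p.2 ++ [i])) p).1)
      = p.1 ++ List.replicate l.length false := by
  intro l
  induction l with
  | nil => intro p; simp
  | cons a t ih =>
    intro p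
    simp only [List.foldl_cons, ih, List.length_cons]
    rw [List.replicate_succ]
    simp

theorem pvInit_fst (n : Nat) : (pvInitA n).1 = List.replicate n false := by
  unfold pvInitA
  rw [pvInit_aux]
  simp [PySem.List.length_pyRange_one]

-- ===== VERDICT (by name: the statement is the Claim_ definition above) =====
theorem second_dfs_spec : Claim_equal_second_dfs := by
  intro graph _ _
  unfold Spec_second_dfs second_dfs second_dfs_alt
  have h := pvOuter graph (PySem.List.pyRange ((graph.length : Int) - 1) (-1) (-1))
    (List.replicate graph.length false) (pvInitA graph.length).2 []
    (by simp)
  rw [pvInit_fst]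
  exact h.2
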